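-- pv_equiv track=rewrite | github.com/EmeryBV/Crypto-compression_of_3D_objects | Crypto-compression_of_3D_objects/Code/Crypto-compression_of_3D_objects/huffman.py | compresser
-- ===== SOURCE A (Python) =====
-- def compterOccurences(texte):
--     lettres = [[0, chr(i)] for i in range(256)]
--     for i in texte:
--         lettres[ord(i)][0] += 1
--     return lettres
--
-- def creerArbre(lettres):
--     # On commence par enlever les lettres qui ne sont pas présentes
--     noeuds = [(k, v) for (k, v) in lettres if k > 0]
--     # Puis on récupère les deux noeuds (ou feuilles) de poids le plus faible,
--     # et on en fait un noeud, de poids la somme des deux petits poids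
--     # On boucle tant qu'il y a reste au moins deux noeuds
--     l = len(noeuds)
--     while l >= 2:
--         # Indice et noeud des minima des poids
--         # (on initialise avec les deux premières valeurs)
--         petitMin = (0, noeuds[0])
--         grandMin = (1, noeuds[1])
--         for i in range(2, l):
--             if noeuds[i][0] <= petitMin[1][0]:  # poids < petitMin < grandMin
--                 grandMin = petitMin
--                 petitMin = (i, noeuds[i])
--             elif noeuds[i][0] <= grandMin[1][0]:  # petitMin < poids < grandMin
--                 grandMin = (i, noeuds[i])
--         nouveauNoeud = (
--             petitMin[1][0] + grandMin[1][0],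
--             noeuds[petitMin[0]],
--             noeuds[grandMin[0]]
--         )
--         # On enlève les deux noeuds (ou feuilles) précedentes
--         # et on ajoute le nouveau noeud
--         noeuds[petitMin[0]] = nouveauNoeud
--         noeuds.pop(grandMin[0])
--         # On a au final un noeud de moins (-2 +1)
--         l -= 1
--     # À cet instant il ne reste plus qu'un noeud, qui est la racine de
--     # l'arbre de Huffman
--     return noeuds[0]
--
-- def creerDico(arbre):
--     fileExploration = [("", arbre)]
--     dico = {}
--     l = 1
--     # On boucle tant que la file n'est pas vide
--     while l >= 1:
--         code, truc = fileExploration.pop(0)  # On défile le premier élément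
--         l -= 1
--         if len(truc) == 2:  # C'est une feuille
--             dico[truc[1]] = code  # On ajoute la lettre et son code au dico
--         elif len(truc) == 3:  # C'est un noeud
--             # On continue l'exploration en respectant la règle pour obtenir le code :
--             # Gauche -> 0, droite -> 1
--             fileExploration.append((code + "0", truc[1]))
--             fileExploration.append((code + "1", truc[2]))
--             l += 2
--     return dico
--
-- def compresser(texte):
--     lettres = compterOccurences(texte)
--     arbre = creerArbre(lettres)
--     dico = creerDico(arbre)
--     texteCompresse = ""
--     for i in texte:
--         texteCompresse += dico[i]
--     # On n'oublie pas de renvoyer aussi le dictionnaire,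
--     # sinon il sera impossible de décompresser le texte
--     return texteCompresse, dico
-- ===== SOURCE B (Python) =====
-- # Huffman compression: count byte frequencies directly, build the tree with a
-- # pure recursion, read the codes off with a DFS, and present the code table in
-- # canonical order (shorter codes first, ties lexicographic).
--
-- def deuxMins(noeuds):
--     petit, grand = (0, noeuds[0]), (1, noeuds[1])
--     for i, n in enumerate(noeuds[2:], 2):
--         if n[0] <= petit[1][0]:
--             petit, grand = (i, n), petit
--         elif n[0] <= grand[1][0]:
--             grand = (i, n)
--     return petit, grand
--
-- def construireArbre(noeuds):
--     if len(noeuds) < 2: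
--         return noeuds[0]
--     (pi, pn), (gi, gn) = deuxMins(noeuds)
--     nouveau = (pn[0] + gn[0], pn, gn)
--     reste = [nouveau if j == pi else n for j, n in enumerate(noeuds) if j != gi]
--     return construireArbre(reste)
--
-- def parcourir(arbre, code, acc):
--     if len(arbre) == 2:          # feuille
--         acc.append((arbre[1], code))
--     else:                        # noeud: gauche -> 0, droite -> 1
--         parcourir(arbre[1], code + "0", acc)
--         parcourir(arbre[2], code + "1", acc)
--
-- def compresser(texte):
--     freqs = [(texte.count(chr(b)), chr(b)) for b in range(256) if chr(b) in texte]
--     arbre = construireArbre(freqs)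
--     paires = []
--     parcourir(arbre, "", paires)
--     # canonical table order: shorter codes first, then lexicographic
--     dico = dict(sorted(paires, key=lambda kv: (len(kv[1]), kv[1])))
--     return "".join(dico[c] for c in texte), dico
-- ===== Notes on version B (the rewrite author's own statement) =====
-- stated objective: alternative
-- what changed: B computes frequencies by per-character count/membership instead of a mutable 256-slot table, builds the Huffman tree by a pure recursion that rebuilds the node list instead of in-place set/pop, and extracts the codes by a recursive DFS whose (letter, code) pairs are presented in canonical order (shorter codes first, ties lexicographic) instead of A's FIFO-queue BFS; the output is assembled with join instead of repeated +=. Pre_ excludes only the empty string, on which A raises IndexError.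
import Mathlib
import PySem

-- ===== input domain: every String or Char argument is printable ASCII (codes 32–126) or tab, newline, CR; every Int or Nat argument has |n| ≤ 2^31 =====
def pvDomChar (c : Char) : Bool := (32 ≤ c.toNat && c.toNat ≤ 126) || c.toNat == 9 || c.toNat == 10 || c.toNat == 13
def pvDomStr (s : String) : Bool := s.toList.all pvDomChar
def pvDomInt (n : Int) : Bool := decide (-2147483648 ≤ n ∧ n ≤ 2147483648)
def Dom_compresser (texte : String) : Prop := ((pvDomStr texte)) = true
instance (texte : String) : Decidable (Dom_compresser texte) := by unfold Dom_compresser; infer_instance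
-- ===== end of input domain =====

-- B counts frequencies per character, builds the tree by a pure recursion, reads the
-- codes off by a DFS and lists the table in canonical (shortlex) order instead of the
-- FIFO-queue BFS; objective: alternative structure, same results.

-- Huffman node: Python's (poids, lettre) 2-tuple is `leaf`, (poids, gauche, droite) is `node`
inductive HTree where
  | leaf : Int → String → HTree
  | node : Int → HTree → HTree → HTree
deriving DecidableEq, Repr

def HTree.w : HTree → Int
  | .leaf k _ => k
  | .node k _ _ => k

def HTree.size : HTree → Nat
  | .leaf _ _ => 1
  | .node _ l r => l.size + r.size + 1

-- default used only where Python would raise IndexError (outside Pre_)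
def pvDummy : HTree := .leaf 0 ""

-- ===== PORT A =====

-- lettres = [[0, chr(i)] for i in range(256)]; for i in texte: lettres[ord(i)][0] += 1
-- (ord(i) < 256 on every Dom string, so the indexed update is always in range)
def compterOccurences (texte : String) : List (Int × Char) :=
  texte.toList.foldl
    (fun lettres c => lettres.modify c.toNat (fun p => (p.1 + 1, p.2)))
    ((List.range 256).map (fun i => ((0 : Int), Char.ofNat i)))

-- the inner `for i in range(2, l)` scan updating (petitMin, grandMin)
def scanStep (noeuds : List HTree) (st : (Int × HTree) × (Int × HTree)) (i : Int) :
    (Int × HTree) × (Int × HTree) :=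
  let n := PySem.List.pyGetD noeuds i pvDummy
  if n.w ≤ st.1.2.w then ((i, n), st.1)
  else if n.w ≤ st.2.2.w then (st.1, (i, n))
  else st

def scanMins (noeuds : List HTree) : (Int × HTree) × (Int × HTree) :=
  (PySem.List.pyRange 2 (noeuds.length : Int)).foldl (scanStep noeuds)
    (((0 : Int), PySem.List.pyGetD noeuds 0 pvDummy), ((1 : Int), PySem.List.pyGetD noeuds 1 pvDummy))

-- the `while l >= 2` loop: noeuds[petitMin[0]] = nouveauNoeud; noeuds.pop(grandMin[0]).
-- Structural recursion on a fuel counter; each pass removes one node, so an initial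
-- fuel of len(noeuds) always suffices (the fuel never runs out on the loop's own runs).
def creerArbreLoop (fuel : Nat) (noeuds : List HTree) : List HTree :=
  match fuel with
  | 0 => noeuds
  | fuel + 1 =>
    if 2 ≤ noeuds.length then
      let pm := (scanMins noeuds).1
      let gm := (scanMins noeuds).2
      let nouveau := HTree.node (pm.2.w + gm.2.w)
        (PySem.List.pyGetD noeuds pm.1 pvDummy) (PySem.List.pyGetD noeuds gm.1 pvDummy)
      match PySem.List.pySet? noeuds pm.1 nouveau with
      | none => noeuds          -- unreachable: petitMin's index is in range
      | some apres =>
        match PySem.List.pop? apres gm.1 with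
        | none => apres         -- unreachable: grandMin's index is in range
        | some r => creerArbreLoop fuel r.2
    else noeuds

def creerArbre (lettres : List (Int × Char)) : HTree :=
  let noeuds := (lettres.filter (fun p => decide (0 < p.1))).map
    (fun p => HTree.leaf p.1 (String.singleton p.2))
  -- `return noeuds[0]` — IndexError on an empty list, i.e. exactly when texte = "" (outside Pre_)
  PySem.List.pyGetD (creerArbreLoop noeuds.length noeuds) 0 pvDummy

-- the FIFO `fileExploration` loop of creerDico; one queue entry is consumed per pass and
-- every tree node enters the queue exactly once, so fuel = (total tree size) suffices
def creerDicoLoop (fuel : Nat) (q : List (String × HTree)) (dico : PySem.Dict String String) :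
    PySem.Dict String String :=
  match fuel with
  | 0 => dico
  | fuel + 1 =>
    match q with
    | [] => dico
    | (code, HTree.leaf _ s) :: rest => creerDicoLoop fuel rest (dico.insert s code)
    | (code, HTree.node _ l r) :: rest =>
        creerDicoLoop fuel (rest ++ [(code ++ "0", l), (code ++ "1", r)]) dico

def creerDico (arbre : HTree) : PySem.Dict String String :=
  creerDicoLoop arbre.size [("", arbre)] PySem.Dict.empty

def compresser (texte : String) : String × (List (String × String)) :=
  let lettres := compterOccurences texte
  let arbre := creerArbre lettres
  let dico := creerDico arbre
  -- dico[i]: a KeyError is impossible (every char of texte has count > 0, hence a code);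
  -- getD with "" is exact on every input admitted by Pre_
  let texteCompresse := texte.toList.foldl
    (fun acc c => acc ++ dico.getD (String.singleton c) "") ""
  (texteCompresse, dico.items)

-- ===== PORT B =====

-- one pass over enumerate(noeuds[2:], 2)  (noeuds[2:] with a literal nonnegative start = drop 2)
def deuxMinsF (noeuds : List HTree) : (Int × HTree) × (Int × HTree) :=
  (PySem.List.enumerate (noeuds.drop 2) 2).foldl
    (fun st p =>
      if p.2.w ≤ st.1.2.w then (p, st.1)
      else if p.2.w ≤ st.2.2.w then (st.1, p)
      else st)
    (((0 : Int), PySem.List.pyGetD noeuds 0 pvDummy), ((1 : Int), PySem.List.pyGetD noeuds 1 pvDummy))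

-- B's recursion removes one node per call: fuel = len(noeuds) always suffices
def construireArbre (fuel : Nat) (noeuds : List HTree) : HTree :=
  match fuel with
  | 0 => PySem.List.pyGetD noeuds 0 pvDummy
  | fuel + 1 =>
    if noeuds.length < 2 then PySem.List.pyGetD noeuds 0 pvDummy
    else
      let pm := (deuxMinsF noeuds).1
      let gm := (deuxMinsF noeuds).2
      let nouveau := HTree.node (pm.2.w + gm.2.w) pm.2 gm.2
      construireArbre fuel
        (((PySem.List.enumerate noeuds 0).filter (fun q => !(q.1 == gm.1))).map
          (fun q => if q.1 == pm.1 then nouveau else q.2))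

-- parcourir(arbre, code, acc): recursive DFS; the Python appends into acc, ported as the returned list
def parcourir (arbre : HTree) (code : String) : List (String × String) :=
  match arbre with
  | .leaf _ s => [(s, code)]
  | .node _ l r => parcourir l (code ++ "0") ++ parcourir r (code ++ "1")

def compresser_alt (texte : String) : String × (List (String × String)) :=
  -- (texte.count(chr(b)), chr(b)) for b in range(256) if chr(b) in texte
  -- (membership and count of a 1-character string = membership and count of the char)
  let freqs := ((List.range 256).filter (fun b => texte.toList.contains (Char.ofNat b))).map
    (fun b => HTree.leaf ((texte.toList.count (Char.ofNat b) : Int)) (String.singleton (Char.ofNat b)))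
  let arbre := construireArbre freqs.length freqs
  let paires := parcourir arbre ""
  -- sorted(paires, key=lambda kv: (len(kv[1]), kv[1]))  — canonical shortlex table order
  let dico := PySem.Dict.ofList
    (PySem.List.sorted2 paires (fun kv => PySem.Str.len kv.2) (fun kv => kv.2))
  (String.join (texte.toList.map (fun c => dico.getD (String.singleton c) "")), dico.items)

-- ===== PRECONDITION & SPEC =====
-- Pre_ excludes only the empty string, on which A raises IndexError (noeuds[0] of an empty list)
def Pre_compresser (texte : String) : Prop := texte ≠ ""
instance (texte : String) : Decidable (Pre_compresser texte) := by unfold Pre_compresser; infer_instance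
def pvWitness_compresser : String := "ab"

def Spec_compresser (texte : String) (out : String × (List (String × String))) : Prop :=
  out = compresser_alt texte
instance (texte : String) (out : String × (List (String × String))) : Decidable (Spec_compresser texte out) := by
  unfold Spec_compresser; infer_instance

-- ===== CLAIM (what is proved, stated in full; the proofs are below) =====
def Claim_equal_compresser : Prop :=
  ∀ (texte : String), Dom_compresser texte → Pre_compresser texte →
    Spec_compresser texte (compresser texte)

-- ===== LEMMAS AND PROOFS =====

-- generic fold invariant
theorem foldl_inv {α β : Type} (l : List α) (f : β → α → β) (b : β) (C : β → Prop)
    (hb : C b) (hf : ∀ s, C s → ∀ a ∈ l, C (f s a)) : C (l.foldl f b) := by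
  induction l generalizing b with
  | nil => exact hb
  | cons x t ih =>
    exact ih (f b x) (hf b hb x (by simp)) (fun s hs a ha => hf s hs a (by simp [ha]))

-- (Char.ofNat i).toNat = i for byte values
theorem toNat_ofNat_byte (i : Nat) (h : i < 256) : (Char.ofNat i).toNat = i := by
  have hv : Nat.isValidChar i := Or.inl (by omega)
  rw [Char.toNat_ofNat, if_pos hv]

theorem ofNat_inj_byte (i : Nat) (c : Char) (hi : i < 256) : Char.ofNat i = c ↔ i = c.toNat := by
  constructor
  · intro h; rw [← h, toNat_ofNat_byte i hi]
  · intro h; subst h; exact Char.ofNat_toNat c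

-- the 256-slot counting table, characterized
theorem table_eq (l : List Char) (h : ∀ c ∈ l, c.toNat < 256) :
    l.foldl (fun lettres c => lettres.modify c.toNat (fun p => (p.1 + 1, p.2)))
      ((List.range 256).map (fun i => ((0 : Int), Char.ofNat i)))
    = (List.range 256).map (fun i => (((l.count (Char.ofNat i)) : Int), Char.ofNat i)) := by
  induction l using List.reverseRecOn with
  | nil => simp
  | append_singleton xs x ih =>
    have hx : x.toNat < 256 := h x (by simp)
    have hxs : ∀ c ∈ xs, c.toNat < 256 := fun c hc => h c (by simp [hc])
    rw [List.foldl_append, ih hxs, List.foldl_cons, List.foldl_nil]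
    apply List.ext_getElem
    · simp
    · intro j hj hj'
      simp only [List.length_map, List.length_range] at hj'
      rw [List.getElem_modify]
      simp only [List.getElem_map, List.getElem_range]
      by_cases hcase : x.toNat = j
      · subst hcase
        simp [Char.ofNat_toNat, List.count_append]
      · have hne : ¬ (Char.ofNat j = x) := by
          rw [ofNat_inj_byte j x hj']; omega
        have h0 : List.count (Char.ofNat j) [x] = 0 :=
          List.count_eq_zero.mpr (by simp; exact hne)
        simp [List.count_append, hcase, h0]

theorem compterOccurences_eq (texte : String) (hDom : Dom_compresser texte) :
    compterOccurences texte
      = (List.range 256).map (fun i => (((texte.toList.count (Char.ofNat i)) : Int), Char.ofNat i)) := by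
  apply table_eq
  intro c hc
  have := List.all_eq_true.mp hDom c hc
  simp [pvDomChar] at this
  omega

-- A's filtered leaf list = B's freqs list
theorem noeuds_eq (texte : String) (hDom : Dom_compresser texte) :
    ((compterOccurences texte).filter (fun p => decide (0 < p.1))).map
      (fun p => HTree.leaf p.1 (String.singleton p.2))
    = ((List.range 256).filter (fun b => texte.toList.contains (Char.ofNat b))).map
      (fun b => HTree.leaf ((texte.toList.count (Char.ofNat b) : Int)) (String.singleton (Char.ofNat b))) := by
  rw [compterOccurences_eq texte hDom, List.filter_map, List.map_map]
  congr 1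
  apply List.filter_congr
  intro b _
  simp [List.count_pos_iff]

-- pyRange is empty past the end
theorem pyRange_nil (a b : Int) (h : b ≤ a) : PySem.List.pyRange a b = [] := by
  simp [PySem.List.pyRange]
  intro
  omega

-- enumerate unrolls one step
theorem enumerate_cons {α : Type} (x : α) (t : List α) (s : Int) :
    PySem.List.enumerate (x :: t) s = (s, x) :: PySem.List.enumerate t (s + 1) := rfl

-- B's enumerate-from-2 scan is A's range(2, l) scan
theorem scan_gen (noeuds : List HTree) :
    ∀ (m k : Nat) (st : (Int × HTree) × (Int × HTree)), m = noeuds.length - k →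
    (PySem.List.enumerate (noeuds.drop k) (k : Int)).foldl
      (fun st p =>
        if p.2.w ≤ st.1.2.w then (p, st.1)
        else if p.2.w ≤ st.2.2.w then (st.1, p)
        else st) st
    = (PySem.List.pyRange (k : Int) (noeuds.length : Int)).foldl (scanStep noeuds) st := by
  intro m
  induction m with
  | zero =>
    intro k st hm
    rw [List.drop_eq_nil_of_le (by omega), pyRange_nil _ _ (by exact_mod_cast by omega)]
    rfl
  | succ m ih =>
    intro k st hm
    have hk : k < noeuds.length := by omega
    rw [← List.getElem_cons_drop hk, enumerate_cons,
      PySem.List.pyRange_one_cons (by exact_mod_cast hk)]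
    rw [List.foldl_cons, List.foldl_cons]
    have hstep : ∀ st : (Int × HTree) × (Int × HTree),
        (if noeuds[k].w ≤ st.1.2.w then (((k : Int), noeuds[k]), st.1)
         else if noeuds[k].w ≤ st.2.2.w then (st.1, ((k : Int), noeuds[k]))
         else st) = scanStep noeuds st (k : Int) := by
      intro st
      simp [scanStep, PySem.List.pyGetD_natCast, List.getD_eq_getElem?_getD, hk]
    rw [hstep]
    have := ih (k + 1) (scanStep noeuds st (k : Int)) (by omega)
    push_cast at this ⊢
    exact this

theorem deuxMinsF_eq_scanMins (noeuds : List HTree) : deuxMinsF noeuds = scanMins noeuds := by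
  unfold deuxMinsF scanMins
  have := scan_gen noeuds (noeuds.length - 2) 2
    (((0 : Int), PySem.List.pyGetD noeuds 0 pvDummy), ((1 : Int), PySem.List.pyGetD noeuds 1 pvDummy)) rfl
  push_cast at this
  exact this

-- the scan's result: two distinct in-range indices, each paired with its element
theorem deuxMinsF_inv (noeuds : List HTree) (h2 : 2 ≤ noeuds.length) :
    ∃ p g : Nat,
      deuxMinsF noeuds = (((p : Int), noeuds.getD p pvDummy), ((g : Int), noeuds.getD g pvDummy)) ∧
      p < noeuds.length ∧ g < noeuds.length ∧ p ≠ g := by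
  have gen : ∀ (m k : Nat) (st : (Int × HTree) × (Int × HTree)), m = noeuds.length - k →
      2 ≤ k → k ≤ noeuds.length →
      (∃ p g : Nat, st = (((p : Int), noeuds.getD p pvDummy), ((g : Int), noeuds.getD g pvDummy)) ∧
        p < k ∧ g < k ∧ p ≠ g) →
      (∃ p g : Nat,
        (PySem.List.enumerate (noeuds.drop k) (k : Int)).foldl
          (fun st p =>
            if p.2.w ≤ st.1.2.w then (p, st.1)
            else if p.2.w ≤ st.2.2.w then (st.1, p)
            else st) st
        = (((p : Int), noeuds.getD p pvDummy), ((g : Int), noeuds.getD g pvDummy)) ∧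
        p < noeuds.length ∧ g < noeuds.length ∧ p ≠ g) := by
    intro m
    induction m with
    | zero =>
      intro k st hm hk2 hkle hst
      rw [List.drop_eq_nil_of_le (by omega)]
      obtain ⟨p, g, hst, hp, hg, hpg⟩ := hst
      exact ⟨p, g, hst, by omega, by omega, hpg⟩
    | succ m ih =>
      intro k st hm hk2 hkle hst
      have hk : k < noeuds.length := by omega
      rw [← List.getElem_cons_drop hk, enumerate_cons, List.foldl_cons]
      obtain ⟨p, g, hst, hp, hg, hpg⟩ := hst
      have hpc : ((k + 1 : Nat) : Int) = (k : Int) + 1 := by push_cast; ring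
      rw [← hpc]
      apply ih (k + 1) _ (by omega) (by omega) (by omega)
      subst hst
      dsimp only
      split
      · exact ⟨k, p, by simp [List.getD_eq_getElem?_getD, List.getElem?_eq_getElem hk],
          by omega, by omega, by omega⟩
      · split
        · exact ⟨p, k, by simp [List.getD_eq_getElem?_getD, List.getElem?_eq_getElem hk],
            by omega, by omega, by omega⟩
        · exact ⟨p, g, rfl, by omega, by omega, hpg⟩
  have h0 : PySem.List.pyGetD noeuds 0 pvDummy = noeuds.getD 0 pvDummy := by
    have := PySem.List.pyGetD_natCast noeuds 0 pvDummy; exact_mod_cast this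
  have h1 : PySem.List.pyGetD noeuds 1 pvDummy = noeuds.getD 1 pvDummy := by
    have := PySem.List.pyGetD_natCast noeuds 1 pvDummy; exact_mod_cast this
  have := gen (noeuds.length - 2) 2
    (((0 : Int), PySem.List.pyGetD noeuds 0 pvDummy), ((1 : Int), PySem.List.pyGetD noeuds 1 pvDummy))
    rfl (by omega) h2 ⟨0, 1, by rw [h0, h1]; norm_num, by omega, by omega, by omega⟩
  unfold deuxMinsF
  push_cast at this ⊢
  exact this

-- B's [nouveau if j == pi else n for j, n in enumerate(noeuds) if j != gi]
-- is A's  noeuds[pi] = nouveau; noeuds.pop(gi)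
theorem enumMapId {α : Type} (t : List α) (s m : Int) (hm : m < s) (nn : α) :
    (PySem.List.enumerate t s).map (fun q => if q.1 == m then nn else q.2) = t := by
  induction t generalizing s with
  | nil => rfl
  | cons x r ih =>
    rw [enumerate_cons, List.map_cons]
    have : ¬ (s == m) = true := by simp; omega
    simp only [this, Bool.false_eq_true, if_false]
    rw [ih (s + 1) (by omega)]

theorem enumFilterId {α : Type} (t : List α) (s m : Int) (hm : m < s) :
    (PySem.List.enumerate t s).filter (fun q => !(q.1 == m)) = PySem.List.enumerate t s := by
  induction t generalizing s with
  | nil => rfl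
  | cons x r ih =>
    rw [enumerate_cons, List.filter_cons]
    have : (s == m) = false := by simp; omega
    simp only [this]
    rw [ih (s + 1) (by omega)]
    rfl

theorem enumMapSet {α : Type} (t : List α) (s : Int) (k : Nat) (nn : α) :
    (PySem.List.enumerate t s).map (fun q => if q.1 == s + (k : Int) then nn else q.2)
      = t.set k nn := by
  induction t generalizing s k with
  | nil => rfl
  | cons x r ih =>
    rw [enumerate_cons, List.map_cons]
    cases k with
    | zero =>
      simp only [Nat.cast_zero, add_zero, beq_self_eq_true, if_true, List.set_cons_zero]
      congr 1
      have := enumMapId r (s + 1) s (by omega) nn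
      simpa using this
    | succ k' =>
      have hne : ¬ (s == s + ((k' + 1 : Nat) : Int)) = true := by simp; omega
      simp only [hne, Bool.false_eq_true, if_false, List.set_cons_succ]
      congr 1
      have := ih (s + 1) k'
      have harith : s + 1 + (k' : Int) = s + ((k' + 1 : Nat) : Int) := by push_cast; ring
      rw [harith] at this
      exact this

theorem enumEraseAbsent {α : Type} (t : List α) (s m : Int) (g : Nat) (hm : m < s) (nn : α) :
    ((PySem.List.enumerate t s).filter (fun q => !(q.1 == s + (g : Int)))).map
      (fun q => if q.1 == m then nn else q.2) = t.eraseIdx g := by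
  induction t generalizing s g with
  | nil => rfl
  | cons x r ih =>
    rw [enumerate_cons, List.filter_cons]
    cases g with
    | zero =>
      simp only [Nat.cast_zero, add_zero, beq_self_eq_true, Bool.not_true, Bool.false_eq_true,
        if_false, List.eraseIdx_cons_zero]
      rw [enumFilterId r (s + 1) s (by omega), enumMapId r (s + 1) m (by omega) nn]
    | succ g' =>
      have hne : ((s == s + ((g' + 1 : Nat) : Int))) = false := by simp; omega
      have hmne : ¬ (s == m) = true := by simp; omega
      simp only [hne, Bool.not_false, if_true, List.eraseIdx_cons_succ, List.map_cons, hmne,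
        Bool.false_eq_true, if_false]
      congr 1
      have := ih (s + 1) g' (by omega)
      have harith : s + 1 + (g' : Int) = s + ((g' + 1 : Nat) : Int) := by push_cast; ring
      rw [harith] at this
      exact this

theorem enumSetErase {α : Type} (t : List α) (s : Int) (p g : Nat) (nn : α) (hpg : p ≠ g) :
    ((PySem.List.enumerate t s).filter (fun q => !(q.1 == s + (g : Int)))).map
      (fun q => if q.1 == s + (p : Int) then nn else q.2) = (t.set p nn).eraseIdx g := by
  induction t generalizing s p g with
  | nil => cases p <;> rfl
  | cons x r ih =>
    rw [enumerate_cons, List.filter_cons]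
    cases g with
    | zero =>
      obtain ⟨p', rfl⟩ : ∃ p', p = p' + 1 := ⟨p - 1, by omega⟩
      simp only [Nat.cast_zero, add_zero, beq_self_eq_true, Bool.not_true, Bool.false_eq_true,
        if_false, List.set_cons_succ, List.eraseIdx_cons_zero]
      rw [enumFilterId r (s + 1) s (by omega)]
      have := enumMapSet r (s + 1) p' nn
      have harith : s + 1 + (p' : Int) = s + ((p' + 1 : Nat) : Int) := by push_cast; ring
      rw [harith] at this
      exact this
    | succ g' =>
      have hgne : ((s == s + ((g' + 1 : Nat) : Int))) = false := by simp; omega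
      cases p with
      | zero =>
        simp only [hgne, Bool.not_false, if_true, List.map_cons, Nat.cast_zero, add_zero,
          beq_self_eq_true, List.set_cons_zero, List.eraseIdx_cons_succ]
        congr 1
        have := enumEraseAbsent r (s + 1) s g' (by omega) nn
        have harith : s + 1 + (g' : Int) = s + ((g' + 1 : Nat) : Int) := by push_cast; ring
        rw [harith] at this
        exact this
      | succ p' =>
        have hpne : ¬ ((s == s + ((p' + 1 : Nat) : Int))) = true := by simp; omega
        simp only [hgne, Bool.not_false, if_true, List.map_cons, hpne, Bool.false_eq_true, if_false,
          List.set_cons_succ, List.eraseIdx_cons_succ]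
        congr 1
        have := ih (s + 1) p' g' (by omega)
        have ha1 : s + 1 + (g' : Int) = s + ((g' + 1 : Nat) : Int) := by push_cast; ring
        have ha2 : s + 1 + (p' : Int) = s + ((p' + 1 : Nat) : Int) := by push_cast; ring
        rw [ha1, ha2] at this
        exact this

-- B's recursive tree construction is A's in-place while loop (same fuel on both sides)
theorem construireArbre_eq_loop :
    ∀ (fuel : Nat) (noeuds : List HTree),
      construireArbre fuel noeuds = PySem.List.pyGetD (creerArbreLoop fuel noeuds) 0 pvDummy := by
  intro fuel
  induction fuel with
  | zero => intro noeuds; rfl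
  | succ fuel ih =>
    intro noeuds
    rw [construireArbre, creerArbreLoop]
    by_cases h2 : 2 ≤ noeuds.length
    · rw [if_neg (by omega), if_pos h2]
      obtain ⟨p, g, hdm, hp, hg, hpg⟩ := deuxMinsF_inv noeuds h2
      have hdm' := hdm; rw [deuxMinsF_eq_scanMins] at hdm'
      have hpy : ∀ (k : Nat), PySem.List.pyGetD noeuds (k : Int) pvDummy = noeuds.getD k pvDummy :=
        fun k => PySem.List.pyGetD_natCast noeuds k pvDummy
      set nn := HTree.node ((noeuds.getD p pvDummy).w + (noeuds.getD g pvDummy).w)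
        (noeuds.getD p pvDummy) (noeuds.getD g pvDummy) with hnn
      have hset := PySem.List.pySet?_natCast noeuds p nn hp
      have hglen : g < (noeuds.set p nn).length := by simp [hg]
      have hpop := PySem.List.pop?_natCast (noeuds.set p nn) g hglen
      have hstep : (match PySem.List.pySet? noeuds (scanMins noeuds).1.1
            (HTree.node ((scanMins noeuds).1.2.w + (scanMins noeuds).2.2.w)
              (PySem.List.pyGetD noeuds (scanMins noeuds).1.1 pvDummy)
              (PySem.List.pyGetD noeuds (scanMins noeuds).2.1 pvDummy)) with
          | none => noeuds
          | some apres =>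
            match PySem.List.pop? apres (scanMins noeuds).2.1 with
            | none => apres
            | some r => creerArbreLoop fuel r.2)
          = creerArbreLoop fuel ((noeuds.set p nn).eraseIdx g) := by
        rw [hdm']
        simp only [hpy]
        rw [← hnn, hset]
        dsimp only
        rw [hpop]
      dsimp only
      rw [hstep]
      simp only [hdm]
      have hcomp := enumSetErase noeuds 0 p g nn hpg
      simp only [zero_add] at hcomp
      rw [hcomp, ih]
    · rw [if_pos (by omega), if_neg h2]

-- the sequence of (letter, code) insertions A's BFS performs, as a plain list
def bfsList (fuel : Nat) (q : List (String × HTree)) : List (String × String) :=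
  match fuel with
  | 0 => []
  | fuel + 1 =>
    match q with
    | [] => []
    | (code, .leaf _ s) :: rest => (s, code) :: bfsList fuel rest
    | (code, .node _ l r) :: rest => bfsList fuel (rest ++ [(code ++ "0", l), (code ++ "1", r)])

theorem bfsList_nil (fuel : Nat) : bfsList fuel [] = [] := by cases fuel <;> rfl

theorem creerDicoLoop_eq :
    ∀ (fuel : Nat) (q : List (String × HTree)) (d : PySem.Dict String String),
      creerDicoLoop fuel q d = (bfsList fuel q).foldl (fun d p => d.insert p.1 p.2) d := by
  intro fuel
  induction fuel with
  | zero => intro q d; rfl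
  | succ fuel ih =>
    intro q d
    match q with
    | [] => rfl
    | (code, .leaf w s) :: rest => rw [creerDicoLoop, bfsList]; simpa using ih rest _
    | (code, .node w l r) :: rest => rw [creerDicoLoop, bfsList]; exact ih _ d

-- total size of the trees in the queue: the number of loop passes the queue still costs
def qsize (q : List (String × HTree)) : Nat := (q.map (fun p => p.2.size)).sum

theorem one_le_size (t : HTree) : 1 ≤ t.size := by
  cases t <;> simp [HTree.size]

-- (proof device) the code read as a 1-prefixed binary numeral: BFS emits codes in
-- strictly increasing `cle` order, and `cle` order on binary codes is shortlex order
def cle (code : String) : Int :=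
  code.toList.foldl (fun a c => 2 * a + (if c = '1' then 1 else 0)) 1

theorem cle_zero : cle "" = 1 := rfl

theorem cle_append0 (c : String) : cle (c ++ "0") = 2 * cle c := by
  unfold cle
  rw [String.toList_append, show ("0" : String).toList = ['0'] from rfl,
    List.foldl_append, List.foldl_cons, List.foldl_nil]
  simp

theorem cle_append1 (c : String) : cle (c ++ "1") = 2 * cle c + 1 := by
  unfold cle
  rw [String.toList_append, show ("1" : String).toList = ['1'] from rfl,
    List.foldl_append, List.foldl_cons, List.foldl_nil]
  simp

theorem one_le_cle (c : String) : 1 ≤ cle c := by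
  unfold cle
  exact foldl_inv c.toList _ 1 (fun a => 1 ≤ a) (by omega)
    (fun a ha ch _ => by dsimp only; split <;> omega)

-- BFS queue invariant: code values strictly increasing, all below twice the head's
def BfsInv : List (String × HTree) → Prop
  | [] => True
  | p :: rest => (p :: rest).Pairwise (fun a b => cle a.1 < cle b.1) ∧
      ∀ x ∈ p :: rest, cle x.1 < 2 * cle p.1

theorem inv_pop (p : String × HTree) (rest : List (String × HTree)) (h : BfsInv (p :: rest)) :
    BfsInv rest := by
  obtain ⟨h2, h3⟩ := h
  rw [List.pairwise_cons] at h2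
  cases rest with
  | nil => trivial
  | cons q t =>
    refine ⟨h2.2, ?_⟩
    intro x hx
    have hq : cle p.1 < cle q.1 := h2.1 q (by simp)
    have hb : cle x.1 < 2 * cle p.1 := h3 x (by simp [hx])
    omega

theorem inv_push (code : String) (w : Int) (l r : HTree) (rest : List (String × HTree))
    (h : BfsInv ((code, .node w l r) :: rest)) :
    BfsInv (rest ++ [(code ++ "0", l), (code ++ "1", r)]) := by
  obtain ⟨h2, h3⟩ := h
  rw [List.pairwise_cons] at h2
  have h1 : 1 ≤ cle code := one_le_cle code
  have hlt : ∀ x ∈ rest, cle code < cle x.1 := fun x hx => h2.1 x (by simp [hx])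
  have hbd : ∀ x ∈ rest, cle x.1 < 2 * cle code := by
    intro x hx
    have := h3 x (by simp [hx]); simpa using this
  have hc0 : cle (code ++ "0") = 2 * cle code := cle_append0 code
  have hc1 : cle (code ++ "1") = 2 * cle code + 1 := cle_append1 code
  cases rest with
  | nil =>
    refine ⟨?_, ?_⟩
    · simp [List.pairwise_cons, hc0, hc1]
    · intro x hx
      simp only [List.mem_cons, List.not_mem_nil, or_false] at hx
      rcases hx with rfl | rfl <;> simp [hc0, hc1] <;> omega
  | cons q t =>
    have hq : cle code < cle q.1 := hlt q (by simp)
    have hqb : cle q.1 < 2 * cle code := hbd q (by simp)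
    rw [show ((q :: t) ++ [(code ++ "0", l), (code ++ "1", r)])
        = q :: (t ++ [(code ++ "0", l), (code ++ "1", r)]) by simp]
    refine ⟨?_, ?_⟩
    · rw [List.pairwise_cons]
      rw [List.pairwise_cons] at h2
      constructor
      · intro a ha
        rcases List.mem_append.mp ha with ha | ha
        · exact h2.2.1 a (by simp [ha])
        · have : cle q.1 < 2 * cle code := hqb
          simp only [List.mem_cons, List.not_mem_nil, or_false] at ha
          rcases ha with rfl | rfl <;> simp [hc0, hc1] <;> omega
      · rw [List.pairwise_append]
        refine ⟨h2.2.2, by simp [List.pairwise_cons, hc0, hc1], ?_⟩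
        intro a ha b hb
        have hax : cle a.1 < 2 * cle code := hbd a (by simp [ha])
        simp only [List.mem_cons, List.not_mem_nil, or_false] at hb
        rcases hb with rfl | rfl <;> simp [hc0, hc1] <;> omega
    · intro x hx
      have hq1 : 2 * cle code < 2 * cle q.1 := by omega
      rcases List.mem_cons.mp hx with rfl | hx
      · omega
      · rcases List.mem_append.mp hx with hx | hx
        · have := hbd x (by simp [hx])
          have := hlt x (by simp [hx])
          omega
        · simp only [List.mem_cons, List.not_mem_nil, or_false] at hx
          rcases hx with rfl | rfl <;> simp [hc0, hc1] <;> omega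

-- every emitted code value is at least the head's
theorem bfs_lower :
    ∀ (fuel : Nat) (q : List (String × HTree)), qsize q ≤ fuel → BfsInv q →
      ∀ p0, q.head? = some p0 → ∀ x ∈ bfsList fuel q, cle p0.1 ≤ cle x.2 := by
  intro fuel
  induction fuel with
  | zero =>
    intro q hq hInv p0 hh x hx
    rw [bfsList] at hx
    cases hx
  | succ fuel ih =>
    intro q hq hInv p0 hh x hx
    match q, hh with
    | (code, .leaf w s) :: rest, hh =>
      injection hh with hh; subst hh
      rw [bfsList] at hx
      rcases List.mem_cons.mp hx with rfl | hx
      · simp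
      · cases rest with
        | nil => rw [bfsList_nil] at hx; cases hx
        | cons q0 t =>
          have hrest : qsize (q0 :: t) ≤ fuel := by
            simp [qsize, HTree.size] at hq ⊢; omega
          have hle := ih _ hrest (inv_pop _ _ hInv) q0 rfl x hx
          obtain ⟨h2, h3⟩ := hInv
          rw [List.pairwise_cons] at h2
          have := h2.1 q0 (by simp)
          simp only at this hle ⊢
          omega
    | (code, .node w l r) :: rest, hh =>
      injection hh with hh; subst hh
      rw [bfsList] at hx
      have hInv' := inv_push code w l r rest hInv
      have hrest : qsize (rest ++ [(code ++ "0", l), (code ++ "1", r)]) ≤ fuel := by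
        simp [qsize, HTree.size] at hq ⊢; omega
      obtain ⟨h2, h3⟩ := hInv
      rw [List.pairwise_cons] at h2
      have h1 : 1 ≤ cle code := one_le_cle code
      cases rest with
      | nil =>
        have hle := ih _ hrest hInv' (code ++ "0", l) rfl x hx
        rw [cle_append0] at hle
        simp only at hle ⊢
        omega
      | cons q0 t =>
        have hle := ih _ hrest hInv' q0 rfl x hx
        have := h2.1 q0 (by simp)
        simp only at this hle ⊢
        omega

-- BFS emission is strictly increasing in code value
theorem bfs_pairwise :
    ∀ (fuel : Nat) (q : List (String × HTree)), qsize q ≤ fuel → BfsInv q →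
      (bfsList fuel q).Pairwise (fun a b => cle a.2 < cle b.2) := by
  intro fuel
  induction fuel with
  | zero => intro q hq hInv; rw [bfsList]; exact List.Pairwise.nil
  | succ fuel ih =>
    intro q hq hInv
    match q with
    | [] => rw [bfsList]; exact List.Pairwise.nil
    | (code, .leaf w s) :: rest =>
      rw [bfsList]
      have hrest : qsize rest ≤ fuel := by
        simp [qsize, HTree.size] at hq ⊢; omega
      refine List.Pairwise.cons ?_ (ih _ hrest (inv_pop _ _ hInv))
      intro x hx
      cases rest with
      | nil => rw [bfsList_nil] at hx; cases hx
      | cons q0 t =>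
        have hle := bfs_lower fuel _ hrest (inv_pop _ _ hInv) q0 rfl x hx
        obtain ⟨h2, h3⟩ := hInv
        rw [List.pairwise_cons] at h2
        have := h2.1 q0 (by simp)
        simp only at this hle ⊢
        omega
    | (code, .node w l r) :: rest =>
      rw [bfsList]
      have hrest : qsize (rest ++ [(code ++ "0", l), (code ++ "1", r)]) ≤ fuel := by
        simp [qsize, HTree.size] at hq ⊢; omega
      exact ih _ hrest (inv_push code w l r rest hInv)

-- BFS emits exactly the DFS leaves (as a multiset)
theorem bfs_perm :
    ∀ (fuel : Nat) (q : List (String × HTree)), qsize q ≤ fuel →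
      (bfsList fuel q).Perm (q.flatMap (fun p => parcourir p.2 p.1)) := by
  intro fuel
  induction fuel with
  | zero =>
    intro q hq
    match q with
    | [] => rw [bfsList]; rfl
    | p :: rest =>
      exfalso
      have := one_le_size p.2
      simp [qsize] at hq
      omega
  | succ fuel ih =>
    intro q hq
    match q with
    | [] => rw [bfsList]; rfl
    | (code, .leaf w s) :: rest =>
      rw [bfsList]
      have hrest : qsize rest ≤ fuel := by
        simp [qsize, HTree.size] at hq ⊢; omega
      simpa [parcourir] using (ih rest hrest).cons (s, code)
    | (code, .node w l r) :: rest =>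
      rw [bfsList]
      have hrest : qsize (rest ++ [(code ++ "0", l), (code ++ "1", r)]) ≤ fuel := by
        simp [qsize, HTree.size] at hq ⊢; omega
      refine (ih _ hrest).trans ?_
      simp only [List.flatMap_append, List.flatMap_cons, List.flatMap_nil, List.append_nil,
        parcourir]
      exact (List.perm_append_comm).trans (by rw [List.append_assoc])

-- bounds for the binary-numeral fold: a*2^n ≤ fold a l < (a+1)*2^n
theorem cle_fold_bounds (l : List Char) : ∀ a : Int,
    a * 2 ^ l.length ≤ l.foldl (fun a c => 2 * a + (if c = '1' then 1 else 0)) a ∧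
    l.foldl (fun a c => 2 * a + (if c = '1' then 1 else 0)) a < (a + 1) * 2 ^ l.length := by
  induction l with
  | nil => intro a; simp
  | cons c t ih =>
    intro a
    rw [List.foldl_cons]
    set b : Int := (if c = '1' then 1 else 0) with hbdef
    have hb0 : 0 ≤ b := by rw [hbdef]; split <;> norm_num
    have hb1 : b ≤ 1 := by rw [hbdef]; split <;> norm_num
    obtain ⟨h1, h2⟩ := ih (2 * a + b)
    have hp : (0 : Int) < 2 ^ t.length := by positivity
    constructor
    · calc a * 2 ^ (c :: t).length = (2 * a) * 2 ^ t.length := by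
            rw [List.length_cons, pow_succ]; ring
        _ ≤ (2 * a + b) * 2 ^ t.length := by nlinarith
        _ ≤ _ := h1
    · calc t.foldl (fun a c => 2 * a + (if c = '1' then 1 else 0)) (2 * a + b)
          < (2 * a + b + 1) * 2 ^ t.length := h2
        _ ≤ (2 * a + 2) * 2 ^ t.length := by nlinarith
        _ = (a + 1) * 2 ^ (c :: t).length := by rw [List.length_cons, pow_succ]; ring

-- on equal-length binary strings, numeral order implies lexicographic order
theorem fold_lt_lex (x : List Char) : ∀ (y : List Char) (a : Int),
    x.length = y.length →
    (∀ c ∈ x, c = '0' ∨ c = '1') → (∀ c ∈ y, c = '0' ∨ c = '1') →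
    x.foldl (fun a c => 2 * a + (if c = '1' then 1 else 0)) a
      < y.foldl (fun a c => 2 * a + (if c = '1' then 1 else 0)) a →
    List.Lex (· < ·) x y := by
  induction x with
  | nil =>
    intro y a hlen _ _ hlt
    cases y with
    | nil => simp at hlt
    | cons d ys => simp at hlen
  | cons c xs ih =>
    intro y a hlen hx hy hlt
    cases y with
    | nil => simp at hlen
    | cons d ys =>
      rw [List.foldl_cons, List.foldl_cons] at hlt
      have hlen' : xs.length = ys.length := by simpa using hlen
      rcases hx c (by simp) with hc | hc <;> rcases hy d (by simp) with hd | hd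
      · -- c = '0', d = '0'
        subst hc; subst hd
        exact List.Lex.cons (ih ys _ hlen' (fun e he => hx e (by simp [he]))
          (fun e he => hy e (by simp [he])) hlt)
      · -- c = '0', d = '1'
        subst hc; subst hd
        exact List.Lex.rel (by decide)
      · -- c = '1', d = '0': contradiction by bounds
        exfalso
        subst hc; subst hd
        have hbx := (cle_fold_bounds xs (2 * a + 1)).1
        have hby := (cle_fold_bounds ys (2 * a + 0)).2
        simp only [if_true, if_neg (by decide : ¬ ('0' = '1'))] at hlt
        rw [hlen'] at hbx
        have : (2 * a + 0 + 1) = (2 * a + 1) := by ring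
        rw [this] at hby
        nlinarith
      · -- c = '1', d = '1'
        subst hc; subst hd
        exact List.Lex.cons (ih ys _ hlen' (fun e he => hx e (by simp [he]))
          (fun e he => hy e (by simp [he])) hlt)

-- binary codes
def BinS (s : String) : Prop := ∀ c ∈ s.toList, c = '0' ∨ c = '1'

-- cle order on binary codes is shortlex order, i.e. Python's (len, code) tuple order
theorem cle_lt_key (x y : String) (hx : BinS x) (hy : BinS y) (h : cle x < cle y) :
    toLex (PySem.Str.len x, x) < toLex (PySem.Str.len y, y) := by
  rw [Prod.Lex.lt_iff]
  have hbx1 := (cle_fold_bounds x.toList 1).1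
  have hby2 := (cle_fold_bounds y.toList 1).2
  unfold cle at h
  rcases lt_trichotomy x.toList.length y.toList.length with hl | hl | hl
  · left
    simp only [PySem.Str.len, ofLex_toLex]
    exact_mod_cast hl
  · right
    refine ⟨by simp [PySem.Str.len, hl], ?_⟩
    rw [String.lt_iff_toList_lt]
    show List.Lex (· < ·) x.toList y.toList
    exact fold_lt_lex x.toList y.toList 1 hl hx hy h
  · exfalso
    have hpow : (2 : Int) ^ (y.toList.length + 1) ≤ 2 ^ x.toList.length :=
      pow_le_pow_right₀ (by norm_num) (by omega)
    rw [pow_succ] at hpow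
    nlinarith
  
-- every code DFS emits from a binary prefix is binary
theorem parcourir_bin (t : HTree) : ∀ (code : String), BinS code →
    ∀ x ∈ parcourir t code, BinS x.2 := by
  induction t with
  | leaf w s =>
    intro code hc x hx
    simp only [parcourir, List.mem_singleton] at hx
    subst hx
    exact hc
  | node w l r ihl ihr =>
    intro code hc x hx
    have hext : ∀ d : Char, d = '0' ∨ d = '1' → BinS (code ++ String.singleton d) := by
      intro d hd e he
      rw [String.toList_append] at he
      rcases List.mem_append.mp he with h | h
      · exact hc e h
      · simp [String.singleton] at h
        subst h; exact hd
    simp only [parcourir, List.mem_append] at hx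
    rcases hx with hx | hx
    · exact ihl (code ++ "0") (by simpa using hext '0' (Or.inl rfl)) x hx
    · exact ihr (code ++ "1") (by simpa using hext '1' (Or.inr rfl)) x hx

-- sorted2 with two linearly ordered keys is sorted with the lexicographic key
theorem sorted2_eq_sorted_lex {α κ₁ κ₂ : Type} [LinearOrder κ₁] [LinearOrder κ₂]
    (xs : List α) (k1 : α → κ₁) (k2 : α → κ₂) :
    PySem.List.sorted2 xs k1 k2 = PySem.List.sorted xs (fun x => toLex (k1 x, k2 x)) := by
  unfold PySem.List.sorted2 PySem.List.sorted
  simp only [if_neg (by decide : ¬ (false = true))]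
  have hbef : (fun (a b : α) => decide (k1 a < k1 b) || (!decide (k1 b < k1 a) && decide (k2 a < k2 b)))
      = fun a b => decide (toLex (k1 a, k2 a) < toLex (k1 b, k2 b)) := by
    funext a b
    by_cases h1 : k1 a < k1 b
    · simp [h1, Prod.Lex.lt_iff]
    · by_cases h2 : k1 b < k1 a
      · simp [h1, h2, h2.ne', Prod.Lex.lt_iff]
      · have heq : k1 a = k1 b := le_antisymm (not_lt.mp h2) (not_lt.mp h1)
        simp [heq, Prod.Lex.lt_iff]
  rw [hbef]

-- sorting the DFS leaves in shortlex order reproduces exactly the BFS insertion order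
theorem sorted_parcourir (t : HTree) :
    PySem.List.sorted2 (parcourir t "") (fun kv => PySem.Str.len kv.2) (fun kv => kv.2)
      = bfsList t.size [("", t)] := by
  rw [sorted2_eq_sorted_lex]
  have hsz : qsize [("", t)] ≤ t.size := by simp [qsize]
  apply PySem.List.sorted_eq_of_perm_of_pairwise_lt
  · refine (bfs_perm t.size [("", t)] hsz).trans ?_
    simp
  · have hpw : (bfsList t.size [("", t)]).Pairwise (fun a b => cle a.2 < cle b.2) := by
      apply bfs_pairwise t.size [("", t)] hsz
      refine ⟨by simp, ?_⟩
      intro x hx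
      simp at hx
      subst hx
      simp [cle_zero]
    have hbin : ∀ x ∈ bfsList t.size [("", t)], BinS x.2 := by
      intro x hx
      have hmem : x ∈ parcourir t "" := by
        have := (bfs_perm t.size [("", t)] hsz).mem_iff.mp hx
        simpa using this
      exact parcourir_bin t "" (by intro c hc; simp at hc) x hmem
    exact List.Pairwise.imp_of_mem
      (fun {a b} ha hb hr => cle_lt_key a.2 b.2 (hbin a ha) (hbin b hb) hr) hpw

-- string concatenation loop = join of the map
theorem strfold (l : List String) : ∀ acc : String, l.foldl (· ++ ·) acc = acc ++ String.join l := by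
  induction l with
  | nil => intro acc; simp [String.join]
  | cons x t ih =>
    intro acc
    have h1 : String.join (x :: t) = x ++ String.join t := by
      show (x :: t).foldl (· ++ ·) "" = x ++ String.join t
      rw [List.foldl_cons, ih ("" ++ x)]
      simp
    rw [List.foldl_cons, ih (acc ++ x), h1, String.append_assoc]

-- ===== VERDICT (by name: the statement is the Claim_ definition above) =====
theorem compresser_spec : Claim_equal_compresser := by
  intro texte hDom _hPre
  unfold Spec_compresser
  show compresser texte = compresser_alt texte
  simp only [compresser, compresser_alt, creerArbre, creerDico]
  rw [← noeuds_eq texte hDom, ← construireArbre_eq_loop]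
  set arbre := construireArbre
    (((compterOccurences texte).filter (fun p => decide (0 < p.1))).map
      (fun p => HTree.leaf p.1 (String.singleton p.2))).length
    (((compterOccurences texte).filter (fun p => decide (0 < p.1))).map
      (fun p => HTree.leaf p.1 (String.singleton p.2))) with harbre
  have hdico : creerDicoLoop arbre.size [("", arbre)] PySem.Dict.empty
      = PySem.Dict.ofList (PySem.List.sorted2 (parcourir arbre "")
          (fun kv => PySem.Str.len kv.2) (fun kv => kv.2)) := by
    rw [creerDicoLoop_eq, sorted_parcourir]
    rfl
  rw [hdico]
  congr 1
  rw [← List.foldl_map (f := fun c => (PySem.Dict.ofList (PySem.List.sorted2 (parcourir arbre "")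
      (fun kv => PySem.Str.len kv.2) (fun kv => kv.2))).getD (String.singleton c) "") (g := (· ++ ·))]
  rw [strfold]
  simp
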